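-- pv_equiv track=rewrite | github.com/timwiddo/Python-Tasks | Task 6 Solution.py | find_first_larger
-- ===== SOURCE A (Python) =====
-- def find_first_larger(L, e):
--
--     links, rechts = 0, len(L) - 1       # Wert ganz links und ganz rechts werden betrachtet bzw zugewiesen
--     result = len(L)                     # Falls kein element gefunden wird soll ja laut aufg länge der liste ausgegeben werden
--
--     while links <= rechts:
--         mitte = (links + rechts) // 2   # brauchen wir für unsere log n laufzeit indem wir gleich liste splitten nach erstem durchlauf wieder gesplittet usw undsofort(Binäre Suche)
--
--
--         if L[mitte] > e:              # Da L sortiert, können wir uns jetzt die eine bzw die andere hälfte der Liste angucken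
--                                         # je nachdem ob unser mittelwert schon größer oder kleiner als gegebenes e ist
--                                         #HIER WIRD LINKE HÄLFTE DURCHSUCHT
--             result = mitte              # Mitte wird jetzt wie ein Zeiger verwendet der durch die Hälfte durchwandert da rechts minimiert wird
--             rechts = mitte - 1          # Mitte wird verschoben und rechts ist neues ende(da alles gr. oder kleiner e irrelevant is) um e näher zu kommen sozusagen
--         else:
--                                         #Hier selbes Prinzip nur mit rechter hälfte
--             links = mitte + 1
--
--     return result
-- ===== SOURCE B (Python) =====
-- def find_first_larger(L, e):
--     # Divide-and-conquer on slices: no index bookkeeping, no best accumulator.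
--     if not L:
--         return 0
--     m = (len(L) - 1) // 2
--     if L[m] > e:
--         return find_first_larger(L[:m], e)
--     return m + 1 + find_first_larger(L[m + 1:], e)
-- ===== Notes on version B (the rewrite author's own statement) =====
-- stated objective: alternative
-- what changed: Replaces the imperative two-pointer loop over (links, rechts, result) with an accumulator-free divide-and-conquer recursion on list slices that probes the same midpoints and adds back the offset of the right half.
import Mathlib
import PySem

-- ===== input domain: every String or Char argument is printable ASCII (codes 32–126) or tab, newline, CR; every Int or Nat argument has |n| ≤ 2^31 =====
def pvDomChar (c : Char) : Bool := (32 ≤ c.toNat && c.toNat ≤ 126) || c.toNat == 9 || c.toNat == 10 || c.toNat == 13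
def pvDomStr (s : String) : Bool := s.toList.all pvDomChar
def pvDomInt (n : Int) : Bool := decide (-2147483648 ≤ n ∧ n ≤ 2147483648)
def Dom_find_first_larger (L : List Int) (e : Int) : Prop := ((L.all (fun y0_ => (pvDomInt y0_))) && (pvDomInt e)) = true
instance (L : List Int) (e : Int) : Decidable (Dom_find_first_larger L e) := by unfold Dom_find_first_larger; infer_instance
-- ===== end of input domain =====

-- B replaces A's two-pointer loop with an accumulator-free divide-and-conquer on list slices (objective: alternative decomposition, same comparison count).

-- ===== PORT A =====
-- A's while loop over the state (links, rechts, result).  The Nat argument is fuel for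
-- totality only: the window [links, rechts] shrinks every iteration, and the top-level
-- call passes len(L)+1 > initial window size, so the fuel never runs out.
-- L[mitte] is always in range when read (0 ≤ links ≤ mitte ≤ rechts < len L), so the
-- pyGetD default 0 is never used.
def pvLoopA (L : List Int) (e : Int) : Nat → Int → Int → Int → Int
  | 0, _, _, result => result
  | fuel + 1, links, rechts, result =>
    if links ≤ rechts then
      let mitte := PySem.Int.floordiv (links + rechts) 2
      if PySem.List.pyGetD L mitte 0 > e then
        pvLoopA L e fuel links (mitte - 1) mitte
      else
        pvLoopA L e fuel (mitte + 1) rechts result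
    else result

def find_first_larger (L : List Int) (e : Int) : Int :=
  pvLoopA L e (L.length + 1) 0 ((L.length : Int) - 1) (L.length : Int)

-- ===== PORT B =====
-- transliteration of Source B: divide and conquer on slices.  The Nat argument is fuel for
-- totality only: each slice is strictly shorter than its list, and every call site
-- passes fuel > len(L), so the fuel never runs out.
def pvAltGo (e : Int) : Nat → List Int → Int
  | 0, _ => 0
  | fuel + 1, L =>
    if L = [] then 0
    else
      let m := PySem.Int.floordiv ((L.length : Int) - 1) 2
      if PySem.List.pyGetD L m 0 > e then
        pvAltGo e fuel (PySem.List.slice L none (some m))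
      else
        m + 1 + pvAltGo e fuel (PySem.List.slice L (some (m + 1)) none)

def find_first_larger_alt (L : List Int) (e : Int) : Int :=
  pvAltGo e (L.length + 1) L

-- ===== PRECONDITION & SPEC =====
def Spec_find_first_larger (L : List Int) (e : Int) (out : Int) : Prop := out = find_first_larger_alt L e
instance (L : List Int) (e : Int) (out : Int) : Decidable (Spec_find_first_larger L e out) := by unfold Spec_find_first_larger; infer_instance

-- ===== CLAIM (what is proved, stated in full; the proofs are below) =====
def Claim_equal_find_first_larger : Prop := ∀ (L : List Int) (e : Int), Dom_find_first_larger L e → Spec_find_first_larger L e (find_first_larger L e)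

-- ===== LEMMAS AND PROOFS =====

-- midpoint bounds for a nonempty list, in the form the proofs use
lemma mid_bounds (n : Int) (h1 : 0 < n) :
    0 ≤ PySem.Int.floordiv (n - 1) 2 ∧ PySem.Int.floordiv (n - 1) 2 ≤ n - 1 := by
  simpa using PySem.Int.floordiv_two_mid_bounds (lo := 0) (hi := n - 1) (by omega)

-- the fuel is irrelevant as long as it exceeds the list's length
lemma altGo_irrel (e : Int) : ∀ (k : Nat), ∀ (L : List Int), L.length = k →
    ∀ (fuel fuel' : Nat), L.length < fuel → L.length < fuel' →
    pvAltGo e fuel L = pvAltGo e fuel' L := by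
  intro k
  induction k using Nat.strong_induction_on with
  | _ k ih =>
    intro L hk fuel fuel' hf hf'
    obtain ⟨f, rfl⟩ : ∃ f, fuel = f + 1 := ⟨fuel - 1, by omega⟩
    obtain ⟨f', rfl⟩ : ∃ f', fuel' = f' + 1 := ⟨fuel' - 1, by omega⟩
    rw [pvAltGo, pvAltGo]
    by_cases h : L = []
    · simp [h]
    · have h1 : (0:Int) < (L.length : Int) := by
        cases L with
        | nil => exact absurd rfl h
        | cons a t => simp
      have hm := mid_bounds (L.length : Int) h1
      set m := PySem.Int.floordiv ((L.length : Int) - 1) 2 with hmdef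
      simp only [h, if_false]
      have hL : PySem.List.slice L none (some m) = L.take m.toNat :=
        PySem.List.slice_to _ (by omega)
      have hR : PySem.List.slice L (some (m + 1)) none = L.drop (m + 1).toNat :=
        PySem.List.slice_from _ (by omega)
      have hlenL : (L.take m.toNat).length < L.length := by simp; omega
      have hlenR : (L.drop (m + 1).toNat).length < L.length := by simp; omega
      split_ifs with hcmp
      · rw [hL, ih (L.take m.toNat).length (by omega) _ rfl f f' (by omega) (by omega)]
      · rw [hR, ih (L.drop (m + 1).toNat).length (by omega) _ rfl f f' (by omega) (by omega)]

lemma altGo_eq_alt (e : Int) (fuel : Nat) (L : List Int) (h : L.length < fuel) :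
    pvAltGo e fuel L = find_first_larger_alt L e :=
  altGo_irrel e L.length L rfl fuel (L.length + 1) h (by omega)

-- one unfolding of B on a nonempty list
lemma alt_step (e : Int) (L : List Int) (h : L ≠ []) :
    find_first_larger_alt L e =
      if PySem.List.pyGetD L (PySem.Int.floordiv ((L.length : Int) - 1) 2) 0 > e then
        find_first_larger_alt (PySem.List.slice L none (some (PySem.Int.floordiv ((L.length : Int) - 1) 2))) e
      else PySem.Int.floordiv ((L.length : Int) - 1) 2 + 1 +
        find_first_larger_alt (PySem.List.slice L (some (PySem.Int.floordiv ((L.length : Int) - 1) 2 + 1)) none) e := by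
  have h1 : (0:Int) < (L.length : Int) := by
    cases L with
    | nil => exact absurd rfl h
    | cons a t => simp
  have hm := mid_bounds (L.length : Int) h1
  set m := PySem.Int.floordiv ((L.length : Int) - 1) 2 with hmdef
  have hL : PySem.List.slice L none (some m) = L.take m.toNat :=
    PySem.List.slice_to _ (by omega)
  have hR : PySem.List.slice L (some (m + 1)) none = L.drop (m + 1).toNat :=
    PySem.List.slice_from _ (by omega)
  rw [find_first_larger_alt, pvAltGo]
  simp only [h, if_false]
  split_ifs with hcmp
  · rw [altGo_eq_alt e L.length _ (by rw [hL]; simp; omega)]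
  · rw [altGo_eq_alt e L.length _ (by rw [hR]; simp; omega)]

-- B's result is between 0 and the length of its list.
lemma alt_bounds (e : Int) : ∀ (k : Nat) (L : List Int), L.length = k →
    0 ≤ find_first_larger_alt L e ∧ find_first_larger_alt L e ≤ (L.length : Int) := by
  intro k
  induction k using Nat.strong_induction_on with
  | _ k ih =>
    intro L hk
    by_cases h : L = []
    · simp [h, find_first_larger_alt, pvAltGo]
    · have h1 : (0:Int) < (L.length : Int) := by
        cases L with
        | nil => exact absurd rfl h
        | cons a t => simp
      have hm := mid_bounds (L.length : Int) h1
      rw [alt_step e L h]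
      set m := PySem.Int.floordiv ((L.length : Int) - 1) 2 with hmdef
      have hL : PySem.List.slice L none (some m) = L.take m.toNat :=
        PySem.List.slice_to _ (by omega)
      have hR : PySem.List.slice L (some (m + 1)) none = L.drop (m + 1).toNat :=
        PySem.List.slice_from _ (by omega)
      split_ifs with hcmp
      · rw [hL]
        have hb := ih (L.take m.toNat).length (by simp; omega) _ rfl
        have hlen : ((L.take m.toNat).length : Int) ≤ (L.length : Int) := by simp
        exact ⟨hb.1, by omega⟩
      · rw [hR]
        have hb := ih (L.drop (m + 1).toNat).length (by simp; omega) _ rfl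
        have hlen : ((L.drop (m + 1).toNat).length : Int) = (L.length : Int) - (m + 1) := by
          simp only [List.length_drop]; omega
        omega

-- A's loop on the window [links, rechts] computes B's answer on the slice L[links : rechts+1],
-- with `result` standing in for the slice's "not found" default.
lemma loopA_eq (L : List Int) (e : Int) : ∀ (fuel : Nat) (links rechts result : Int),
    (rechts + 1 - links).toNat < fuel → 0 ≤ links → rechts < (L.length : Int) →
    pvLoopA L e fuel links rechts result =
      (if find_first_larger_alt ((L.drop links.toNat).take (rechts + 1 - links).toNat) e
          = (((L.drop links.toNat).take (rechts + 1 - links).toNat).length : Int) then result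
       else links + find_first_larger_alt ((L.drop links.toNat).take (rechts + 1 - links).toNat) e) := by
  intro fuel
  induction fuel with
  | zero => intro links rechts result hfuel; omega
  | succ f ihf =>
    intro links rechts result hfuel h0 hr
    rw [pvLoopA]
    by_cases h : links ≤ rechts
    · have hm := PySem.Int.floordiv_two_mid_bounds h
      rw [if_pos h]
      set mitte := PySem.Int.floordiv (links + rechts) 2 with hmdef
      set seg := (L.drop links.toNat).take (rechts + 1 - links).toNat with hseg
      have hseglen : (seg.length : Int) = rechts + 1 - links := by
        simp only [hseg, List.length_take, List.length_drop]; push_cast; omega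
      have hsegne : seg ≠ [] := by
        intro hnil; rw [hnil] at hseglen; simp at hseglen; omega
      -- the midpoint of A is the midpoint of the slice, shifted by links
      have hmid : PySem.Int.floordiv ((seg.length : Int) - 1) 2 = mitte - links := by
        rw [hseglen, hmdef]
        rw [PySem.Int.floordiv_eq_ediv_of_pos (by omega), PySem.Int.floordiv_eq_ediv_of_pos (by omega)]
        omega
      -- the probed element agrees
      have hprobe : PySem.List.pyGetD seg (mitte - links) 0 = PySem.List.pyGetD L mitte 0 := by
        rw [PySem.List.pyGetD_eq_getElem seg 0 (by omega) (by omega),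
            PySem.List.pyGetD_eq_getElem L 0 (by omega) (by omega)]
        simp only [hseg]
        rw [List.getElem_take, List.getElem_drop]
        congr 1; omega
      -- unfold B on seg
      have haltseg : find_first_larger_alt seg e =
          if PySem.List.pyGetD L mitte 0 > e then
            find_first_larger_alt (PySem.List.slice seg none (some (mitte - links))) e
          else (mitte - links) + 1 + find_first_larger_alt (PySem.List.slice seg (some (mitte - links + 1)) none) e := by
        rw [alt_step e seg hsegne, hmid, hprobe]
      have hsliceL : PySem.List.slice seg none (some (mitte - links)) =
          (L.drop links.toNat).take ((mitte - 1) + 1 - links).toNat := by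
        rw [PySem.List.slice_to _ (by omega)]
        simp only [hseg, List.take_take]
        congr 1; omega
      have hsliceR : PySem.List.slice seg (some (mitte - links + 1)) none =
          (L.drop (mitte + 1).toNat).take (rechts + 1 - (mitte + 1)).toNat := by
        rw [PySem.List.slice_from _ (by omega)]
        simp only [hseg, List.drop_take, List.drop_drop]
        congr 2 <;> omega
      show (if PySem.List.pyGetD L mitte 0 > e then pvLoopA L e f links (mitte - 1) mitte
             else pvLoopA L e f (mitte + 1) rechts result) = _
      by_cases hcmp : PySem.List.pyGetD L mitte 0 > e
      · -- left half: result becomes mitte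
        rw [if_pos hcmp, haltseg, if_pos hcmp, hsliceL,
            ihf links (mitte - 1) mitte (by omega) h0 (by omega)]
        set seg' := (L.drop links.toNat).take ((mitte - 1) + 1 - links).toNat with hseg'
        have hseg'len : (seg'.length : Int) = mitte - links := by
          simp only [hseg', List.length_take, List.length_drop]; push_cast; omega
        have hb := alt_bounds e seg'.length seg' rfl
        split_ifs with h1 h2 h2 <;> omega
      · -- right half
        rw [if_neg hcmp, haltseg, if_neg hcmp, hsliceR,
            ihf (mitte + 1) rechts result (by omega) (by omega) hr]
        set seg' := (L.drop (mitte + 1).toNat).take (rechts + 1 - (mitte + 1)).toNat with hseg'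
        have hseg'len : (seg'.length : Int) = rechts - mitte := by
          simp only [hseg', List.length_take, List.length_drop]; push_cast; omega
        have hb := alt_bounds e seg'.length seg' rfl
        split_ifs with h1 h2 h2 <;> omega
    · -- empty window: the slice is [], B returns 0 = its length, so the default `result` is kept
      rw [if_neg h]
      have h0' : (rechts + 1 - links).toNat = 0 := by omega
      simp only [h0', List.take_zero]
      rw [find_first_larger_alt, pvAltGo]
      simp

-- ===== VERDICT (by name: the statement is the Claim_ definition above) =====
theorem find_first_larger_spec : Claim_equal_find_first_larger := by
  intro L e _
  unfold Spec_find_first_larger find_first_larger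
  rw [loopA_eq L e (L.length + 1) 0 ((L.length : Int) - 1) (L.length : Int) (by omega) (by omega) (by omega)]
  simp only [Int.toNat_zero, List.drop_zero]
  have hL : ((L.length : Int) - 1 + 1 - 0).toNat = L.length := by omega
  rw [hL, List.take_length]
  have hb := alt_bounds e L.length L rfl
  split_ifs with h1 <;> omega
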